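-- pv_equiv track=rewrite | github.com/chmnchiang/bcw_codebook | Contest/ASC27/pJ.py | ca
-- ===== SOURCE A (Python) =====
-- def ca(m, n):
-- 	res = 2*(n-1) + (m-1)**n
-- 	for i in range(1, n):
-- 		for j in range(i+1, n):
-- 			res += 4 * (m-1)**(j-i)
-- 	for i in range(1, n):
-- 		res += 4 * (m-1)**i
-- 	return res
-- ===== SOURCE B (Python) =====
-- def ca(m, n):
--     # one pass: accumulate running power of (m-1); coefficient of (m-1)**d is 4*(n-d)
--     x = m - 1
--     acc = 0
--     pw = 1
--     for d in range(1, n):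
--         pw *= x
--         acc += (n - d) * pw
--     return 2 * (n - 1) + x ** n + 4 * acc
-- ===== Notes on version B (the rewrite author's own statement) =====
-- stated objective: faster
-- what changed: Replaced the O(n^2) double loop of freshly computed (m-1)**(j-i) powers by a single pass keeping a running power of (m-1) and using that the coefficient of (m-1)**d in the total is 4*(n-d).
-- outside the precondition, e.g. on ca(3, -1): A returns -3.5, B returns -3.5; on ca(1, -2): A raises ZeroDivisionError, B raises ZeroDivisionError
import Mathlib
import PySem

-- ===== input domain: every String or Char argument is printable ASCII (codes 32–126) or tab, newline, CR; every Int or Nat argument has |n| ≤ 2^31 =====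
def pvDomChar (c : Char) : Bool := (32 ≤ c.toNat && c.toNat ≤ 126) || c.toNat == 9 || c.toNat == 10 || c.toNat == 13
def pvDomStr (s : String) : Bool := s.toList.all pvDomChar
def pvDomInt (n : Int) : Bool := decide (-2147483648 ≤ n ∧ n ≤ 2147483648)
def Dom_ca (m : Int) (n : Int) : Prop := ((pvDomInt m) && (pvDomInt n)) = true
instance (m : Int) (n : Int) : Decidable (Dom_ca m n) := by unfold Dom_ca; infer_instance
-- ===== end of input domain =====

-- B replaces A's O(n^2) double loop of fresh (m-1)**(j-i) powers by one pass with a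
-- running power of (m-1), using that the coefficient of (m-1)**d in the total is 4*(n-d).

-- ===== PORT A =====
def ca (m : Int) (n : Int) : Int :=
  let res := 2 * (n - 1) + (m - 1) ^ n.toNat
  let res := (PySem.List.pyRange 1 n 1).foldl
      (fun r i => (PySem.List.pyRange (i + 1) n 1).foldl
        (fun r j => r + 4 * (m - 1) ^ (j - i).toNat) r) res
  (PySem.List.pyRange 1 n 1).foldl (fun r i => r + 4 * (m - 1) ^ i.toNat) res

-- ===== PORT B =====
def ca_alt (m : Int) (n : Int) : Int :=
  let x := m - 1
  let s := (PySem.List.pyRange 1 n 1).foldl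
      (fun (p : Int × Int) d => (p.1 + (n - d) * (p.2 * x), p.2 * x)) ((0 : Int), (1 : Int))
  2 * (n - 1) + x ^ n.toNat + 4 * s.1

-- ===== PRECONDITION & SPEC =====
-- Pre_ excludes n < 0, where Python's ** returns a float (not an int, m ≠ 1) or raises ZeroDivisionError (m = 1).
def Pre_ca (m : Int) (n : Int) : Prop := 0 ≤ n
instance (m : Int) (n : Int) : Decidable (Pre_ca m n) := by unfold Pre_ca; infer_instance
def pvWitness_ca : Int × Int := (3, 5)
def Spec_ca (m : Int) (n : Int) (out : Int) : Prop := out = ca_alt m n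
instance (m : Int) (n : Int) (out : Int) : Decidable (Spec_ca m n out) := by unfold Spec_ca; infer_instance

-- ===== CLAIM (what is proved, stated in full; the proofs are below) =====
def Claim_equal_ca : Prop := ∀ (m : Int) (n : Int), Dom_ca m n → Pre_ca m n → Spec_ca m n (ca m n)

-- ===== LEMMAS AND PROOFS =====

-- sum of x^(k+1) for k < N
def pvP (x : Int) (N : Nat) : Int := ((List.range N).map (fun k => x ^ (k + 1))).sum
-- A's double-loop total: for each k < N, a geometric block of length N-1-k
def pvG (x : Int) (N : Nat) : Int := ((List.range N).map (fun k => pvP x (N - 1 - k))).sum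
-- B's weighted total
def pvW (x : Int) (N : Nat) : Int :=
  ((List.range N).map (fun k => ((N - k : Nat) : Int) * x ^ (k + 1))).sum

lemma pvP_succ (x : Int) (N : Nat) : pvP x (N + 1) = pvP x N + x ^ (N + 1) := by
  simp [pvP, List.range_succ]

lemma pv_sum_map_add (f g : Nat → Int) (l : List Nat) :
    (l.map (fun k => f k + g k)).sum = (l.map f).sum + (l.map g).sum := by
  induction l with
  | nil => simp
  | cons h t ih => simp [ih]; ring

lemma pv_reflect (x : Int) (N : Nat) :
    ((List.range N).map (fun k => x ^ (N - k))).sum = pvP x N := by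
  induction N with
  | zero => simp [pvP]
  | succ N ih =>
    rw [pvP_succ, ← ih, List.range_succ_eq_map]
    simp only [List.map_cons, List.map_map, List.sum_cons]
    have h : (List.range N).map ((fun k => x ^ (N + 1 - k)) ∘ Nat.succ)
         = (List.range N).map (fun k => x ^ (N - k)) := by
      apply List.map_congr_left
      intro a _
      simp only [Function.comp]
      congr 1
      omega
    rw [h]
    have h2 : N + 1 - 0 = N + 1 := by omega
    rw [h2]
    ring

lemma pvG_succ (x : Int) (N : Nat) : pvG x (N + 1) = pvG x N + pvP x N := by
  rw [pvG, List.range_succ]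
  simp only [List.map_append, List.sum_append, List.map_cons, List.map_nil, List.sum_cons,
    List.sum_nil]
  have h1 : (List.range N).map (fun k => pvP x (N + 1 - 1 - k))
          = (List.range N).map (fun k => pvP x (N - 1 - k) + x ^ (N - k)) := by
    apply List.map_congr_left
    intro a ha
    simp only [List.mem_range] at ha
    have he : N + 1 - 1 - a = (N - 1 - a) + 1 := by omega
    rw [he, pvP_succ]
    congr 2
    omega
  rw [h1, pv_sum_map_add, pv_reflect]
  simp [pvG, pvP]

lemma pvW_succ (x : Int) (N : Nat) :
    pvW x (N + 1) = pvW x N + pvP x N + x ^ (N + 1) := by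
  rw [pvW, List.range_succ]
  simp only [List.map_append, List.sum_append, List.map_cons, List.map_nil, List.sum_cons,
    List.sum_nil]
  have h1 : (List.range N).map (fun k => ((N + 1 - k : Nat) : Int) * x ^ (k + 1))
          = (List.range N).map (fun k => ((N - k : Nat) : Int) * x ^ (k + 1) + x ^ (k + 1)) := by
    apply List.map_congr_left
    intro a ha
    simp only [List.mem_range] at ha
    have he : N + 1 - a = (N - a) + 1 := by omega
    rw [he]
    push_cast
    ring
  rw [h1, pv_sum_map_add]
  simp [pvW, pvP]

lemma pv_key (x : Int) (N : Nat) : pvG x N + pvP x N = pvW x N := by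
  induction N with
  | zero => simp [pvG, pvP, pvW]
  | succ N ih =>
    rw [pvG_succ, pvW_succ, pvP_succ, ← ih]
    ring

-- A's inner loop is a geometric block
lemma pv_inner (x n : Int) (i r : Int) :
    (PySem.List.pyRange (i + 1) n 1).foldl (fun r j => r + 4 * x ^ (j - i).toNat) r
      = r + 4 * pvP x (n - i - 1).toNat := by
  rw [PySem.List.pyRange_one, PySem.List.foldl_add, List.map_map]
  have h : (List.range (n - (i + 1)).toNat).map ((fun j => 4 * x ^ (j - i).toNat) ∘ (fun k : Nat => i + 1 + (k : Int)))
         = (List.range (n - (i + 1)).toNat).map (fun k : Nat => 4 * x ^ (k + 1)) := by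
    apply List.map_congr_left
    intro a _
    simp only [Function.comp]
    congr 1
    have : (i + 1 + (a : Int)) - i = ((a + 1 : Nat) : Int) := by push_cast; ring
    rw [this, Int.toNat_natCast]
  rw [h]
  have h2 : ∀ (l : List Nat), (l.map (fun k : Nat => 4 * x ^ (k + 1))).sum
      = 4 * (l.map (fun k : Nat => x ^ (k + 1))).sum := by
    intro l
    induction l with
    | nil => simp
    | cons hd tl ih => simp [ih]; ring
  rw [h2]
  have h3 : (n - (i + 1)).toNat = (n - i - 1).toNat := by omega
  rw [h3]
  rfl

-- B's fold invariant
lemma pv_bfold (x n : Int) (j : Nat) :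
    ((List.range j).map (fun k : Nat => (1 : Int) + k)).foldl
        (fun (p : Int × Int) d => (p.1 + (n - d) * (p.2 * x), p.2 * x)) ((0 : Int), (1 : Int))
      = (((List.range j).map (fun k : Nat => (n - (1 + (k : Int))) * x ^ (k + 1))).sum, x ^ j) := by
  induction j with
  | zero => simp
  | succ j ih =>
    rw [List.range_succ]
    simp only [List.map_append, List.map_cons, List.map_nil, List.foldl_append, ih,
      List.foldl_cons, List.foldl_nil, List.sum_append, List.sum_cons, List.sum_nil]
    rw [Prod.mk.injEq]
    exact ⟨by ring, by ring⟩

-- ===== VERDICT (by name: the statement is the Claim_ definition above) =====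
theorem ca_spec : Claim_equal_ca := by
  intro m n _ hn
  unfold Spec_ca ca ca_alt
  set x := m - 1 with hx
  simp only []
  rcases eq_or_lt_of_le hn with h0 | hpos
  · -- n = 0 : all ranges are empty
    rw [PySem.List.pyRange_one_eq_nil (by omega)]
    simp
  · -- n ≥ 1 : let N = (n-1).toNat, so n = N + 1
    set N := (n - 1).toNat with hN
    have hn1 : n = (N : Int) + 1 := by omega
    rw [PySem.List.pyRange_one]
    have hcnt : (n - 1).toNat = N := rfl
    rw [hcnt]
    -- rewrite A's inner loop to a closed block, then A's folds to sums
    simp only [pv_inner]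
    rw [PySem.List.foldl_add, PySem.List.foldl_add, pv_bfold]
    simp only [List.map_map]
    have hA1 : (List.range N).map ((fun i => 4 * pvP x (n - i - 1).toNat) ∘ (fun k : Nat => (1 : Int) + k))
             = (List.range N).map (fun k : Nat => 4 * pvP x (N - 1 - k)) := by
      apply List.map_congr_left
      intro a ha
      simp only [List.mem_range] at ha
      simp only [Function.comp]
      have he : (n - (1 + (a : Int)) - 1).toNat = N - 1 - a := by omega
      rw [he]
    have hA2 : (List.range N).map ((fun i => 4 * x ^ i.toNat) ∘ (fun k : Nat => (1 : Int) + k))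
             = (List.range N).map (fun k : Nat => 4 * x ^ (k + 1)) := by
      apply List.map_congr_left
      intro a _
      simp only [Function.comp]
      congr 1
      have : (1 : Int) + (a : Int) = ((a + 1 : Nat) : Int) := by push_cast; ring
      rw [this, Int.toNat_natCast]
    have hB : (List.range N).map (fun k : Nat => (n - (1 + (k : Int))) * x ^ (k + 1))
            = (List.range N).map (fun k : Nat => ((N - k : Nat) : Int) * x ^ (k + 1)) := by
      apply List.map_congr_left
      intro a ha
      simp only [List.mem_range] at ha
      congr 1
      omega
    rw [hA1, hA2, hB]
    have hfac : ∀ (f : Nat → Int) (l : List Nat),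
        (l.map (fun k => 4 * f k)).sum = 4 * (l.map f).sum := by
      intro f l
      induction l with
      | nil => simp
      | cons hd tl ih => simp [ih]; ring
    rw [hfac, hfac]
    rw [show (List.map (fun k => pvP x (N - 1 - k)) (List.range N)).sum = pvG x N from rfl]
    rw [show (List.map (fun k : Nat => x ^ (k + 1)) (List.range N)).sum = pvP x N from rfl]
    rw [show (List.map (fun k : Nat => ((N - k : Nat) : Int) * x ^ (k + 1)) (List.range N)).sum = pvW x N from rfl]
    linarith [pv_key x N]
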